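-- pv_equiv track=rewrite | github.com/pranjalchalise/deep_research | src/nodes/planner.py | generate_comparison_queries
-- ===== SOURCE A (Python) =====
-- from typing import Any, Dict, List, Optional
--
-- def generate_comparison_queries(
--     entity1: str,
--     entity2: str,
--     context_terms: List[str]
-- ) -> List[Dict[str, Any]]:
--     """Generate optimized queries for comparison research."""
--     queries = []
--
--     # Direct comparison
--     queries.append({
--         "query": f'{entity1} vs {entity2}',
--         "section": "Comparison",
--         "lane": "general",
--         "purpose": "direct_comparison"
--     })
--
--     queries.append({
--         "query": f'{entity1} vs {entity2} differences',
--         "section": "Key Differences",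
--         "lane": "general",
--         "purpose": "differences"
--     })
--
--     queries.append({
--         "query": f'{entity1} vs {entity2} which is better',
--         "section": "Recommendation",
--         "lane": "forums",
--         "purpose": "recommendation"
--     })
--
--     # Individual entity queries
--     queries.append({
--         "query": f'{entity1} advantages benefits',
--         "section": f"{entity1} Pros",
--         "lane": "general",
--         "purpose": "entity1_pros"
--     })
--
--     queries.append({
--         "query": f'{entity2} advantages benefits',
--         "section": f"{entity2} Pros",
--         "lane": "general",
--         "purpose": "entity2_pros"
--     })
--
--     queries.append({
--         "query": f'{entity1} disadvantages limitations',
--         "section": f"{entity1} Cons",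
--         "lane": "forums",
--         "purpose": "entity1_cons"
--     })
--
--     queries.append({
--         "query": f'{entity2} disadvantages limitations',
--         "section": f"{entity2} Cons",
--         "lane": "forums",
--         "purpose": "entity2_cons"
--     })
--
--     # Use cases
--     queries.append({
--         "query": f'when to use {entity1} vs {entity2}',
--         "section": "When to Use",
--         "lane": "general",
--         "purpose": "use_cases"
--     })
--
--     for i, q in enumerate(queries, 1):
--         q["qid"] = f"Q{i}"
--
--     return queries
-- ===== SOURCE B (Python) =====
-- from typing import Any, Dict, List
--
--
-- def _mk(query: str, section: str, lane: str, purpose: str) -> Dict[str, Any]: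
--     return {"query": query, "section": section, "lane": lane, "purpose": purpose}
--
--
-- def _number(qs: List[Dict[str, Any]], i: int = 1) -> List[Dict[str, Any]]:
--     """Recursively attach qid = Q<i> to each query, front to back."""
--     if not qs:
--         return []
--     head = dict(qs[0])
--     head["qid"] = f"Q{i}"
--     return [head] + _number(qs[1:], i + 1)
--
--
-- def generate_comparison_queries(
--     entity1: str,
--     entity2: str,
--     context_terms: List[str]
-- ) -> List[Dict[str, Any]]:
--     """Generate optimized queries for comparison research."""
--     vs = f"{entity1} vs {entity2}"
--     comparison = [
--         _mk(vs, "Comparison", "general", "direct_comparison"),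
--         _mk(f"{vs} differences", "Key Differences", "general", "differences"),
--         _mk(f"{vs} which is better", "Recommendation", "forums", "recommendation"),
--     ]
--     # the four per-entity queries come from a nested loop (pros/cons x entities)
--     entity_block = [
--         _mk(f"{e} {phrase}", f"{e} {label}", lane, f"entity{i}_{tag}")
--         for (phrase, label, lane, tag) in [
--             ("advantages benefits", "Pros", "general", "pros"),
--             ("disadvantages limitations", "Cons", "forums", "cons"),
--         ]
--         for i, e in enumerate((entity1, entity2), 1)
--     ]
--     use_cases = [_mk(f"when to use {vs}", "When to Use", "general", "use_cases")]
--     return _number(comparison + entity_block + use_cases)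
-- ===== Notes on version B (the rewrite author's own statement) =====
-- stated objective: alternative
-- what changed: B builds the result from three concatenated segments (a comparison segment, the four per-entity queries generated by a nested pros/cons-by-entity loop instead of four literal dicts, and a use-cases segment) and assigns qids by a recursive front-to-back numbering function that copies each dict, instead of A's eight literal appends followed by an in-place mutation loop.
import Mathlib
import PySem

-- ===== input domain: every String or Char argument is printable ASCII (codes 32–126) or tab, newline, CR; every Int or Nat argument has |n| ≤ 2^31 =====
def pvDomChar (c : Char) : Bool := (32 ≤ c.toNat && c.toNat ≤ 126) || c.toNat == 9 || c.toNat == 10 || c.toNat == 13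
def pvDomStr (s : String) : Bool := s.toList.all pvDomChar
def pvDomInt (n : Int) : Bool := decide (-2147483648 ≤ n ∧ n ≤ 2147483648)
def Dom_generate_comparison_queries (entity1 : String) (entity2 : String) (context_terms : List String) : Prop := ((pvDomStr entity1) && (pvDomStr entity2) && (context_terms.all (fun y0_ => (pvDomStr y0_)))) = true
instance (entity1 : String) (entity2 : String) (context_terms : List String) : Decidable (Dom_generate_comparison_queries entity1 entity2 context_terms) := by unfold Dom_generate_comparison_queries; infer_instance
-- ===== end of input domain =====

-- B builds three concatenated segments (middle four via a nested pros/cons-by-entity loop) and attaches qids by a recursive numbering pass (objective: alternative).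


-- ===== PORT A =====
-- Port of A: eight explicit dict appends into `queries`, then the enumerate
-- loop mutating each dict with q["qid"] = f"Q{i}" (new key appends at the end).
def generate_comparison_queries (entity1 : String) (entity2 : String) (_context_terms : List String) : List (List (String × String)) :=
  let queries : List (List (String × String)) :=
    [ [("query", entity1 ++ " vs " ++ entity2), ("section", "Comparison"), ("lane", "general"), ("purpose", "direct_comparison")]
    , [("query", entity1 ++ " vs " ++ entity2 ++ " differences"), ("section", "Key Differences"), ("lane", "general"), ("purpose", "differences")]
    , [("query", entity1 ++ " vs " ++ entity2 ++ " which is better"), ("section", "Recommendation"), ("lane", "forums"), ("purpose", "recommendation")]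
    , [("query", entity1 ++ " advantages benefits"), ("section", entity1 ++ " Pros"), ("lane", "general"), ("purpose", "entity1_pros")]
    , [("query", entity2 ++ " advantages benefits"), ("section", entity2 ++ " Pros"), ("lane", "general"), ("purpose", "entity2_pros")]
    , [("query", entity1 ++ " disadvantages limitations"), ("section", entity1 ++ " Cons"), ("lane", "forums"), ("purpose", "entity1_cons")]
    , [("query", entity2 ++ " disadvantages limitations"), ("section", entity2 ++ " Cons"), ("lane", "forums"), ("purpose", "entity2_cons")]
    , [("query", "when to use " ++ entity1 ++ " vs " ++ entity2), ("section", "When to Use"), ("lane", "general"), ("purpose", "use_cases")]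
    ]
  (PySem.List.enumerate queries 1).map
    (fun iq => ((PySem.Dict.mk iq.2).insert "qid" ("Q" ++ PySem.Int.toStr iq.1)).items)

-- ===== PORT B =====
-- Port of B: _mk builds one query dict; the middle four queries come from a
-- nested pros/cons-by-entity loop; _number recursively attaches qids.
def pvMk (query sect lane purpose : String) : List (String × String) :=
  [("query", query), ("section", sect), ("lane", lane), ("purpose", purpose)]

-- Port of _number: dict(q) copies, then inserting the fresh key "qid".
def pvNumber : List (List (String × String)) → Int → List (List (String × String))
  | [], _ => []
  | q :: rest, i =>
      ((PySem.Dict.mk q).insert "qid" ("Q" ++ PySem.Int.toStr i)).items :: pvNumber rest (i + 1)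

def generate_comparison_queries_alt (entity1 : String) (entity2 : String) (_context_terms : List String) : List (List (String × String)) :=
  let vs := entity1 ++ " vs " ++ entity2
  let comparison : List (List (String × String)) :=
    [ pvMk vs "Comparison" "general" "direct_comparison"
    , pvMk (vs ++ " differences") "Key Differences" "general" "differences"
    , pvMk (vs ++ " which is better") "Recommendation" "forums" "recommendation" ]
  let entityBlock : List (List (String × String)) :=
    ([ ("advantages benefits", "Pros", "general", "pros")
     , ("disadvantages limitations", "Cons", "forums", "cons") ] :
       List (String × String × String × String)).flatMap
      (fun t => (PySem.List.enumerate [entity1, entity2] 1).map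
        (fun ie => pvMk (ie.2 ++ " " ++ t.1) (ie.2 ++ " " ++ t.2.1) t.2.2.1
                        ("entity" ++ PySem.Int.toStr ie.1 ++ "_" ++ t.2.2.2)))
  let useCases : List (List (String × String)) :=
    [ pvMk ("when to use " ++ vs) "When to Use" "general" "use_cases" ]
  pvNumber (comparison ++ entityBlock ++ useCases) 1

-- ===== PRECONDITION & SPEC =====
def Spec_generate_comparison_queries (entity1 : String) (entity2 : String) (context_terms : List String) (out : List (List (String × String))) : Prop := out = generate_comparison_queries_alt entity1 entity2 context_terms
instance (entity1 : String) (entity2 : String) (context_terms : List String) (out : List (List (String × String))) : Decidable (Spec_generate_comparison_queries entity1 entity2 context_terms out) := by unfold Spec_generate_comparison_queries; infer_instance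

-- ===== CLAIM (what is proved, stated in full; the proofs are below) =====
def Claim_equal_generate_comparison_queries : Prop := ∀ (entity1 : String) (entity2 : String) (context_terms : List String), Dom_generate_comparison_queries entity1 entity2 context_terms → Spec_generate_comparison_queries entity1 entity2 context_terms (generate_comparison_queries entity1 entity2 context_terms)

-- ===== LEMMAS AND PROOFS =====

-- literal-append facts used to normalise B's f"{e} {phrase}" concatenations
theorem pv_sp_adv : (" " ++ "advantages benefits" : String) = " advantages benefits" := by decide
theorem pv_sp_pros : (" " ++ "Pros" : String) = " Pros" := by decide
theorem pv_sp_dis : (" " ++ "disadvantages limitations" : String) = " disadvantages limitations" := by decide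
theorem pv_sp_cons : (" " ++ "Cons" : String) = " Cons" := by decide

-- ===== VERDICT (by name: the statement is the Claim_ definition above) =====
theorem generate_comparison_queries_spec : Claim_equal_generate_comparison_queries := by
  intro e1 e2 ct _
  unfold Spec_generate_comparison_queries
  simp [generate_comparison_queries, generate_comparison_queries_alt, pvNumber, pvMk,
        PySem.List.enumerate, PySem.Dict.insert,
        PySem.Dict.contains, PySem.Int.toStr, String.append_assoc,
        pv_sp_adv, pv_sp_pros, pv_sp_dis, pv_sp_cons]
  decide
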